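-- pv_equiv track=rewrite | github.com/mamikula/Introduction-to-Computer-Science | Kolosy/KP17-18P02.py | rekur
-- ===== SOURCE A (Python) =====
-- def rekur(t1, t2, id, s1, s2, m1, m2):
--     if id == len(t1):
--         if s1 == s2 and m1 == m2:
--             return m1
--         else:
--             return 0
--
--     return( max(rekur(t1, t2, id + 1, s1 + t1[id], s2 + t2[id], m1 + 1, m2 + 1),
--                 rekur(t1, t2, id + 1, s1 + t1[id], s2, m1 + 1, m2),
--                 rekur(t1, t2, id + 1, s1, s2 + t2[id], m1, m2 + 1),
--                 rekur(t1, t2, id + 1, s1, s2, m1, m2,)))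
-- ===== SOURCE B (Python) =====
-- def rekur(t1, t2, id, s1, s2, m1, m2):
--     # Meet in the middle: only the differences (s1-s2, m1-m2) matter, so enumerate
--     # each half of the remaining index range into a dict keyed by the (sum-diff,
--     # count-diff) it adds, keeping the best number of t1-inclusions, then join.
--     idx = list(range(id, len(t1)))
--     half = idx[:len(idx) // 2]
--     rest = idx[len(idx) // 2:]
--
--     def enum(indices):
--         states = {(0, 0): 0}
--         for i in indices:
--             a = t1[i]
--             b = t2[i]
--             nxt = {}
--             for (d, c), m in states.items():
--                 for dd, dc, dm in ((a - b, 0, 1), (a, 1, 1), (-b, -1, 0), (0, 0, 0)):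
--                     k = (d + dd, c + dc)
--                     v = m + dm
--                     if k not in nxt or v > nxt[k]:
--                         nxt[k] = v
--             states = nxt
--         return states
--
--     left = enum(half)
--     right = enum(rest)
--     best = None
--     for (d, c), m in left.items():
--         r = right.get((s2 - s1 - d, m2 - m1 - c))
--         if r is not None:
--             v = m1 + m + r
--             if best is None or v > best:
--                 best = v
--     if not idx:
--         return best if best is not None else 0
--     return 0 if best is None else max(best, 0)
-- ===== Notes on version B (the rewrite author's own statement) =====
-- stated objective: alternative
-- what changed: A explores all 4^n include/exclude combinations by four-way recursion; B reduces the state to the (sum-difference, count-difference) pair, enumerates each half of the remaining index range once into a dictionary keyed by that pair keeping the best t1-inclusion count, and joins the two halves by dictionary lookup (meet in the middle; intended as faster, but a timing run could not confirm a uniform speed-up, so none is claimed).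
import Mathlib
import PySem

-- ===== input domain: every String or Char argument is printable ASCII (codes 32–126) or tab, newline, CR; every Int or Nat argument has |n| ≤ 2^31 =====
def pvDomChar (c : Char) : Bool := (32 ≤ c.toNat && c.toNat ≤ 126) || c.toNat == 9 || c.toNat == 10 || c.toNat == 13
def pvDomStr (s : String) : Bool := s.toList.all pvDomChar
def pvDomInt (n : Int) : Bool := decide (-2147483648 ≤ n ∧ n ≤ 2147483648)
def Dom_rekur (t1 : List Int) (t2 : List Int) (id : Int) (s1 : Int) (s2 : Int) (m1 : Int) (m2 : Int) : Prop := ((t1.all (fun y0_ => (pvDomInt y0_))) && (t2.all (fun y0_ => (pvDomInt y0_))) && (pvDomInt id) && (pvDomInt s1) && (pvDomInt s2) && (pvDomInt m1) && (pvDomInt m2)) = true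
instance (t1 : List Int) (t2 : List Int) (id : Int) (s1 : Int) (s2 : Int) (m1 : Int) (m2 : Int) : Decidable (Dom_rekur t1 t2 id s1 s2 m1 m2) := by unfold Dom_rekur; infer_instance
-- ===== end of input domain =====

-- B replaces A's four-way recursion over all include/exclude combinations by a
-- meet-in-the-middle enumeration: each half of the remaining index range is summarised
-- into a (sum-diff, count-diff) → best-inclusion-count dictionary, and the halves are
-- joined by dictionary lookup (a different algorithm; intended as faster, but the timing
-- run could not confirm a uniform speed-up, so none is claimed).

-- ===== PORT A =====
def rekur (t1 : List Int) (t2 : List Int) (id : Int) (s1 : Int) (s2 : Int) (m1 : Int) (m2 : Int) : Int :=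
  if _h : id = (t1.length : Int) then
    if s1 = s2 ∧ m1 = m2 then m1 else 0
  else
    match h1 : PySem.List.pyGet? t1 id, PySem.List.pyGet? t2 id with
    | some a, some b =>
        max (max (max (rekur t1 t2 (id + 1) (s1 + a) (s2 + b) (m1 + 1) (m2 + 1))
                      (rekur t1 t2 (id + 1) (s1 + a) s2 (m1 + 1) m2))
                 (rekur t1 t2 (id + 1) s1 (s2 + b) m1 (m2 + 1)))
            (rekur t1 t2 (id + 1) s1 s2 m1 m2)
    | _, _ => 0  -- Python raises IndexError here; excluded by Pre_rekur
termination_by ((t1.length : Int) - id).toNat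
decreasing_by
  all_goals
    have hir : ¬ PySem.List.pyGet? t1 id = none := by simp [h1]
    rw [PySem.List.pyGet?_eq_none_iff] at hir
    have := not_not.mp hir
    unfold PySem.Raise.InRange at this
    omega

-- ===== PORT B =====
def pvMoves (a b : Int) : List (Int × Int × Int) := [(a - b, 0, 1), (a, 1, 1), (-b, -1, 0), (0, 0, 0)]

def pvInsMax (d : PySem.Dict (Int × Int) Int) (k : Int × Int) (v : Int) : PySem.Dict (Int × Int) Int :=
  match d.get? k with
  | none => d.insert k v
  | some v0 => if v > v0 then d.insert k v else d

def pvStep (t1 t2 : List Int) (states : PySem.Dict (Int × Int) Int) (i : Int) : PySem.Dict (Int × Int) Int :=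
  let a := PySem.List.pyGetD t1 i 0   -- Pre_rekur keeps every visited index in range
  let b := PySem.List.pyGetD t2 i 0
  states.items.foldl (fun nxt s =>
    (pvMoves a b).foldl (fun nxt mv => pvInsMax nxt (s.1.1 + mv.1, s.1.2 + mv.2.1) (s.2 + mv.2.2)) nxt)
    PySem.Dict.empty

def pvEnum (t1 t2 : List Int) (indices : List Int) : PySem.Dict (Int × Int) Int :=
  indices.foldl (pvStep t1 t2) (PySem.Dict.ofList [((0, 0), 0)])

def rekur_alt (t1 : List Int) (t2 : List Int) (id : Int) (s1 : Int) (s2 : Int) (m1 : Int) (m2 : Int) : Int :=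
  let idx := PySem.List.pyRange id (t1.length : Int) 1
  let h := PySem.Int.floordiv (idx.length : Int) 2
  let half := PySem.List.slice idx none (some h)
  let rest := PySem.List.slice idx (some h) none
  let left := pvEnum t1 t2 half
  let right := pvEnum t1 t2 rest
  let best := left.items.foldl (fun best s =>
    match right.get? (s2 - s1 - s.1.1, m2 - m1 - s.1.2) with
    | none => best
    | some r =>
        let v := m1 + s.2 + r
        match best with
        | none => some v
        | some bv => if v > bv then some v else some bv) none
  if idx = [] then
    match best with | some b => b | none => 0
  else
    match best with | none => 0 | some b => max b 0

-- ===== PRECONDITION & SPEC =====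
-- Pre_rekur is exactly where the Python A returns: every visited index id, id+1, …, len(t1)-1
-- must be a valid (possibly negative, Python-style) index into both lists, else A raises IndexError.
def Pre_rekur (t1 : List Int) (t2 : List Int) (id : Int) (s1 : Int) (s2 : Int) (m1 : Int) (m2 : Int) : Prop :=
  -(t1.length : Int) ≤ id ∧ id ≤ (t1.length : Int) ∧
    (id < (t1.length : Int) → (t1.length : Int) ≤ (t2.length : Int)) ∧
    (id < 0 → -(t2.length : Int) ≤ id)
instance (t1 : List Int) (t2 : List Int) (id : Int) (s1 : Int) (s2 : Int) (m1 : Int) (m2 : Int) : Decidable (Pre_rekur t1 t2 id s1 s2 m1 m2) := by unfold Pre_rekur; infer_instance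

def pvWitness_rekur : List Int × List Int × Int × Int × Int × Int × Int := ([1, 2, 3], [3, 1, 2], 0, 0, 0, 0, 0)

def Spec_rekur (t1 : List Int) (t2 : List Int) (id : Int) (s1 : Int) (s2 : Int) (m1 : Int) (m2 : Int) (out : Int) : Prop := out = rekur_alt t1 t2 id s1 s2 m1 m2
instance (t1 : List Int) (t2 : List Int) (id : Int) (s1 : Int) (s2 : Int) (m1 : Int) (m2 : Int) (out : Int) : Decidable (Spec_rekur t1 t2 id s1 s2 m1 m2 out) := by unfold Spec_rekur; infer_instance

-- ===== CLAIM (what is proved, stated in full; the proofs are below) =====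
def Claim_equal_rekur : Prop := ∀ (t1 : List Int) (t2 : List Int) (id : Int) (s1 : Int) (s2 : Int) (m1 : Int) (m2 : Int), Dom_rekur t1 t2 id s1 s2 m1 m2 → Pre_rekur t1 t2 id s1 s2 m1 m2 → Spec_rekur t1 t2 id s1 s2 m1 m2 (rekur t1 t2 id s1 s2 m1 m2)

-- ===== LEMMAS AND PROOFS =====

-- abstract path semantics shared by both proofs
def pvAdd3 (p q : Int × Int × Int) : Int × Int × Int := (p.1 + q.1, p.2.1 + q.2.1, p.2.2 + q.2.2)

def pvPaths : List (Int × Int) → List (Int × Int × Int)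
  | [] => [(0, 0, 0)]
  | ab :: l => (pvMoves ab.1 ab.2).flatMap (fun mv => (pvPaths l).map (fun p => pvAdd3 mv p))

def pvVal (d c m : Int) (p : Int × Int × Int) : Int :=
  if d + p.1 = 0 ∧ c + p.2.1 = 0 then m + p.2.2 else 0

def pvMaxOf : List Int → Int
  | [] => 0
  | x :: t => t.foldl max x

def pvPairs (t1 t2 : List Int) (l : List Int) : List (Int × Int) :=
  l.map (fun i => (PySem.List.pyGetD t1 i 0, PySem.List.pyGetD t2 i 0))

-- max-of-list toolbox
theorem pvFoldl_max_assoc (s : List Int) : ∀ (a b : Int), s.foldl max (max a b) = max a (s.foldl max b) := by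
  induction s with
  | nil => intro a b; rfl
  | cons y t ih =>
    intro a b
    simp only [List.foldl_cons]
    rw [max_assoc, ih]

theorem pvFoldl_max_acc (v : List Int) (a : Int) (hv : v ≠ []) :
    v.foldl max a = max a (pvMaxOf v) := by
  match v with
  | y :: s =>
    simp only [List.foldl_cons, pvMaxOf]
    rw [show max a y = max a (max y y) by simp, pvFoldl_max_assoc]
    simp

theorem pvMaxOf_append (u v : List Int) (hu : u ≠ []) (hv : v ≠ []) :
    pvMaxOf (u ++ v) = max (pvMaxOf u) (pvMaxOf v) := by
  match u with
  | x :: t =>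
    simp only [pvMaxOf, List.cons_append, List.foldl_append]
    rw [pvFoldl_max_acc v _ hv]
    rfl

theorem le_pvMaxOf (l : List Int) (y : Int) (h : y ∈ l) : y ≤ pvMaxOf l := by
  match l with
  | x :: t =>
    simp only [pvMaxOf]
    rcases List.mem_cons.mp h with rfl | ht
    · exact (PySem.List.le_foldl_max t y).1
    · exact (PySem.List.le_foldl_max t x).2 y ht

theorem pvMaxOf_le (l : List Int) (x : Int) (hl : l ≠ []) (h : ∀ y ∈ l, y ≤ x) : pvMaxOf l ≤ x := by
  match l with
  | z :: t =>
    simp only [pvMaxOf]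
    rcases PySem.List.foldl_max_mem t z with he | he
    · rw [he]; exact h z (List.mem_cons_self)
    · exact h _ (List.mem_cons_of_mem z he)


-- paths toolbox
theorem pvPaths_ne_nil (l : List (Int × Int)) : pvPaths l ≠ [] := by
  induction l with
  | nil => simp [pvPaths]
  | cons ab l ih =>
    simp only [pvPaths, ne_eq, List.flatMap_eq_nil_iff, not_forall]
    exact ⟨(ab.1 - ab.2, 0, 1), by simp [pvMoves], by simpa using ih⟩

theorem mem_pvPaths_cons (ab : Int × Int) (l : List (Int × Int)) (p : Int × Int × Int) :
    p ∈ pvPaths (ab :: l) ↔ ∃ mv ∈ pvMoves ab.1 ab.2, ∃ r ∈ pvPaths l, p = pvAdd3 mv r := by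
  simp only [pvPaths, List.mem_flatMap, List.mem_map]
  constructor
  · rintro ⟨mv, hmv, r, hr, rfl⟩; exact ⟨mv, hmv, r, hr, rfl⟩
  · rintro ⟨mv, hmv, r, hr, rfl⟩; exact ⟨mv, hmv, r, hr, rfl⟩

theorem pvAdd3_assoc (a b c : Int × Int × Int) : pvAdd3 a (pvAdd3 b c) = pvAdd3 (pvAdd3 a b) c := by
  simp only [pvAdd3]; refine Prod.ext (by ring) (Prod.ext (by ring) (by ring))

theorem pvAdd3_zero (b : Int × Int × Int) : pvAdd3 (0, 0, 0) b = b := by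
  simp only [pvAdd3]; refine Prod.ext (by ring) (Prod.ext (by ring) (by ring))

theorem mem_pvPaths_append (u v : List (Int × Int)) (p : Int × Int × Int) :
    p ∈ pvPaths (u ++ v) ↔ ∃ a ∈ pvPaths u, ∃ b ∈ pvPaths v, p = pvAdd3 a b := by
  induction u generalizing p with
  | nil =>
    simp only [List.nil_append, pvPaths, List.mem_singleton]
    constructor
    · intro hp; exact ⟨(0,0,0), rfl, p, hp, (pvAdd3_zero p).symm⟩
    · rintro ⟨a, rfl, b, hb, rfl⟩; rw [pvAdd3_zero]; exact hb
  | cons ab u ih =>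
    rw [List.cons_append, mem_pvPaths_cons]
    constructor
    · rintro ⟨mv, hmv, r, hr, rfl⟩
      rcases (ih r).mp hr with ⟨a, ha, b, hb, rfl⟩
      exact ⟨pvAdd3 mv a, (mem_pvPaths_cons ab u _).mpr ⟨mv, hmv, a, ha, rfl⟩, b, hb, pvAdd3_assoc mv a b⟩
    · rintro ⟨a, ha, b, hb, rfl⟩
      rcases (mem_pvPaths_cons ab u a).mp ha with ⟨mv, hmv, a', ha', rfl⟩
      exact ⟨mv, hmv, pvAdd3 a' b, (ih _).mpr ⟨a', ha', b, hb, rfl⟩, (pvAdd3_assoc mv a' b).symm⟩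

theorem pvPaths_mem_up (l : List (Int × Int)) : ∃ p ∈ pvPaths l, p.2.1 = (l.length : Int) := by
  induction l with
  | nil => exact ⟨(0,0,0), by simp [pvPaths]⟩
  | cons ab l ih =>
    rcases ih with ⟨p, hp, hγ⟩
    refine ⟨pvAdd3 (ab.1, 1, 1) p, (mem_pvPaths_cons ab l _).mpr ⟨(ab.1, 1, 1), by simp [pvMoves], p, hp, rfl⟩, ?_⟩
    simp only [pvAdd3, List.length_cons]
    push_cast
    omega

theorem pvPaths_mem_dn (l : List (Int × Int)) : ∃ p ∈ pvPaths l, p.2.1 = -(l.length : Int) := by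
  induction l with
  | nil => exact ⟨(0,0,0), by simp [pvPaths]⟩
  | cons ab l ih =>
    rcases ih with ⟨p, hp, hγ⟩
    refine ⟨pvAdd3 (-ab.2, -1, 0) p, (mem_pvPaths_cons ab l _).mpr ⟨(-ab.2, -1, 0), by simp [pvMoves], p, hp, rfl⟩, ?_⟩
    simp only [pvAdd3, List.length_cons]
    push_cast
    omega

theorem pvPaths_zero_val (l : List (Int × Int)) (d c m : Int) (hl : l ≠ []) :
    ∃ p ∈ pvPaths l, pvVal d c m p = 0 := by
  have hlen : 1 ≤ (l.length : Int) := by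
    have : l.length ≠ 0 := by simpa [List.length_eq_zero_iff] using hl
    omega
  by_cases hc : c + (l.length : Int) = 0
  · rcases pvPaths_mem_dn l with ⟨p, hp, hγ⟩
    exact ⟨p, hp, by simp only [pvVal, hγ]; rw [if_neg]; rintro ⟨-, h2⟩; omega⟩
  · rcases pvPaths_mem_up l with ⟨p, hp, hγ⟩
    exact ⟨p, hp, by simp only [pvVal, hγ]; rw [if_neg]; rintro ⟨-, h2⟩; omega⟩

theorem pvPairs_cons (t1 t2 : List Int) (i : Int) (l : List Int) :
    pvPairs t1 t2 (i :: l) = (PySem.List.pyGetD t1 i 0, PySem.List.pyGetD t2 i 0) :: pvPairs t1 t2 l := rfl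

-- characterisation of A: rekur is the max of pvVal over all paths of the remaining suffix
theorem rekur_char (t1 t2 : List Int) (k : Nat) :
    ∀ (id s1 s2 m1 m2 : Int), ((t1.length : Int) - id).toNat = k → id ≤ (t1.length : Int) →
    (∀ i : Int, id ≤ i → i < (t1.length : Int) →
        PySem.Raise.InRange t1.length i ∧ PySem.Raise.InRange t2.length i) →
    rekur t1 t2 id s1 s2 m1 m2 =
      pvMaxOf ((pvPaths (pvPairs t1 t2 (PySem.List.pyRange id (t1.length : Int) 1))).map
        (pvVal (s1 - s2) (m1 - m2) m1)) := by
  induction k with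
  | zero =>
    intro id s1 s2 m1 m2 hk hle hacc
    have hid : id = (t1.length : Int) := by omega
    rw [rekur, dif_pos hid]
    rw [hid, PySem.List.pyRange_one_eq_nil (le_refl _)]
    simp only [pvPairs, List.map_nil, pvPaths, List.map_cons, List.map_nil, pvMaxOf, List.foldl_nil]
    have hiff : ((s1 - s2) + (0:Int) = 0 ∧ (m1 - m2) + (0:Int) = 0) ↔ (s1 = s2 ∧ m1 = m2) := by omega
    simp only [pvVal, hiff]
    split_ifs <;> omega
  | succ k ih =>
    intro id s1 s2 m1 m2 hk hle hacc
    have hid : id < (t1.length : Int) := by omega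
    rcases hacc id (le_refl id) hid with ⟨hr1, hr2⟩
    obtain ⟨a, ha⟩ : ∃ a, PySem.List.pyGet? t1 id = some a := by
      cases hg : PySem.List.pyGet? t1 id with
      | none => exact absurd hr1 ((PySem.List.pyGet?_eq_none_iff _ _).mp hg)
      | some a => exact ⟨a, rfl⟩
    obtain ⟨b, hb⟩ : ∃ b, PySem.List.pyGet? t2 id = some b := by
      cases hg : PySem.List.pyGet? t2 id with
      | none => exact absurd hr2 ((PySem.List.pyGet?_eq_none_iff _ _).mp hg)
      | some b => exact ⟨b, rfl⟩
    have hga : PySem.List.pyGetD t1 id 0 = a := by simp [PySem.List.pyGetD, ha]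
    have hgb : PySem.List.pyGetD t2 id 0 = b := by simp [PySem.List.pyGetD, hb]
    -- unfold one step of A
    have hstep : rekur t1 t2 id s1 s2 m1 m2 =
        max (max (max (rekur t1 t2 (id + 1) (s1 + a) (s2 + b) (m1 + 1) (m2 + 1))
                      (rekur t1 t2 (id + 1) (s1 + a) s2 (m1 + 1) m2))
                 (rekur t1 t2 (id + 1) s1 (s2 + b) m1 (m2 + 1)))
            (rekur t1 t2 (id + 1) s1 s2 m1 m2) := by
      rw [rekur, dif_neg (by omega : ¬ id = (t1.length : Int))]
      split
      · rename_i a' b' h1' h2'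
        rw [ha] at h1'
        rw [hb] at h2'
        cases h1'
        cases h2'
        rfl
      · rename_i hcon
        exact absurd (hcon a b) (by simp [ha, hb])
    rw [hstep]
    -- unfold one step of the path list
    rw [PySem.List.pyRange_one_cons hid, pvPairs_cons, hga, hgb]
    have hmaps : ∀ (mv : Int × Int × Int),
        ((pvPaths (pvPairs t1 t2 (PySem.List.pyRange (id + 1) (t1.length : Int) 1))).map
          (fun p => pvAdd3 mv p)).map (pvVal (s1 - s2) (m1 - m2) m1)
        = (pvPaths (pvPairs t1 t2 (PySem.List.pyRange (id + 1) (t1.length : Int) 1))).map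
          (pvVal ((s1 - s2) + mv.1) ((m1 - m2) + mv.2.1) (m1 + mv.2.2)) := by
      intro mv
      rw [List.map_map]
      apply List.map_congr_left
      intro p _
      simp only [Function.comp_apply, pvVal, pvAdd3]
      by_cases h : (s1 - s2) + mv.1 + p.1 = 0 ∧ (m1 - m2) + mv.2.1 + p.2.1 = 0
      · rw [if_pos (show (s1 - s2) + (mv.1 + p.1) = 0 ∧ (m1 - m2) + (mv.2.1 + p.2.1) = 0 by omega),
          if_pos h]
        ring
      · rw [if_neg (show ¬((s1 - s2) + (mv.1 + p.1) = 0 ∧ (m1 - m2) + (mv.2.1 + p.2.1) = 0) by omega),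
          if_neg h]
    have hne : ∀ (f : (Int × Int × Int) → Int),
        ((pvPaths (pvPairs t1 t2 (PySem.List.pyRange (id + 1) (t1.length : Int) 1))).map f) ≠ [] := by
      intro f h
      exact pvPaths_ne_nil _ (List.map_eq_nil_iff.mp h)
    have hacc' : ∀ i : Int, id + 1 ≤ i → i < (t1.length : Int) →
        PySem.Raise.InRange t1.length i ∧ PySem.Raise.InRange t2.length i := by
      intro i h1 h2; exact hacc i (by omega) h2
    have hk' : ((t1.length : Int) - (id + 1)).toNat = k := by omega
    have hIH := fun s1' s2' m1' m2' => ih (id + 1) s1' s2' m1' m2' hk' (by omega) hacc'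
    -- assemble the four branches
    simp only [pvPaths, pvMoves, List.flatMap_cons, List.flatMap_nil, List.append_nil, List.map_append]
    rw [hmaps, hmaps, hmaps, hmaps]
    dsimp only
    rw [pvMaxOf_append _ _ (hne _) (by
        refine fun h => ?_
        rcases List.append_eq_nil_iff.mp h with ⟨h1, -⟩
        exact hne _ h1),
      pvMaxOf_append _ _ (hne _) (by
        refine fun h => ?_
        rcases List.append_eq_nil_iff.mp h with ⟨h1, -⟩
        exact hne _ h1),
      pvMaxOf_append _ _ (hne _) (hne _)]
    rw [hIH (s1 + a) (s2 + b) (m1 + 1) (m2 + 1), hIH (s1 + a) s2 (m1 + 1) m2,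
      hIH s1 (s2 + b) m1 (m2 + 1), hIH s1 s2 m1 m2]
    have e1 : (s1 + a) - (s2 + b) = (s1 - s2) + (a - b) := by ring
    have e2 : (m1 + 1) - (m2 + 1) = (m1 - m2) + 0 := by ring
    have e3 : (s1 + a) - s2 = (s1 - s2) + a := by ring
    have e4 : (m1 + 1) - m2 = (m1 - m2) + 1 := by ring
    have e5 : s1 - (s2 + b) = (s1 - s2) + -b := by ring
    have e6 : m1 - (m2 + 1) = (m1 - m2) + -1 := by ring
    have e7 : s1 - s2 = (s1 - s2) + 0 := by ring
    have e8 : m1 - m2 = (m1 - m2) + 0 := by ring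
    have e9 : m1 = m1 + 0 := by ring
    rw [e1, e2, e3, e4, e5, e6]
    nth_rewrite 4 [e7]
    nth_rewrite 6 [e8]
    nth_rewrite 7 [e9]
    ac_rfl

-- insert-max dictionary toolbox
theorem pvInsMax_nodup (d : PySem.Dict (Int × Int) Int) (k : Int × Int) (v : Int)
    (h : d.keys.Nodup) : (pvInsMax d k v).keys.Nodup := by
  unfold pvInsMax
  cases d.get? k with
  | none => exact PySem.Dict.nodup_keys_insert _ _ _ h
  | some v0 =>
    by_cases hv : v > v0
    · simp only [hv, if_true]; exact PySem.Dict.nodup_keys_insert _ _ _ h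
    · simpa only [hv, if_false] using h

theorem pvInsMax_mem (d : PySem.Dict (Int × Int) Int) (k : Int × Int) (v : Int)
    (p : (Int × Int) × Int) (h : p ∈ (pvInsMax d k v).items) : p ∈ d.items ∨ p = (k, v) := by
  unfold pvInsMax at h
  cases hg : d.get? k with
  | none =>
    rw [hg] at h
    rcases (PySem.Dict.mem_items_insert _ _ _ _).mp h with rfl | ⟨hd, -⟩
    · exact Or.inr rfl
    · exact Or.inl hd
  | some v0 =>
    rw [hg] at h
    by_cases hv : v > v0
    · simp only [hv, if_true] at h
      rcases (PySem.Dict.mem_items_insert _ _ _ _).mp h with rfl | ⟨hd, -⟩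
      · exact Or.inr rfl
      · exact Or.inl hd
    · simp only [hv, if_false] at h; exact Or.inl h

theorem pvInsMax_self (d : PySem.Dict (Int × Int) Int) (k : Int × Int) (v : Int)
    (h : d.keys.Nodup) : ∃ w, (k, w) ∈ (pvInsMax d k v).items ∧ v ≤ w := by
  unfold pvInsMax
  cases hg : d.get? k with
  | none => exact ⟨v, PySem.Dict.mem_items_insert_self _ _ _, le_refl v⟩
  | some v0 =>
    by_cases hv : v > v0
    · simp only [hv, if_true]
      exact ⟨v, PySem.Dict.mem_items_insert_self _ _ _, le_refl v⟩
    · simp only [hv, if_false]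
      exact ⟨v0, PySem.Dict.mem_items_of_get?_eq_some _ hg, by omega⟩

theorem pvInsMax_pres (d : PySem.Dict (Int × Int) Int) (k : Int × Int) (v : Int)
    (k0 : Int × Int) (w0 : Int) (h : d.keys.Nodup) (hm : (k0, w0) ∈ d.items) :
    ∃ w, (k0, w) ∈ (pvInsMax d k v).items ∧ w0 ≤ w := by
  unfold pvInsMax
  by_cases hk : k0 = k
  · subst hk
    have hg : d.get? k0 = some w0 := PySem.Dict.get?_of_mem_items _ hm h
    rw [hg]
    by_cases hv : v > w0
    · simp only [hv, if_true]
      exact ⟨v, PySem.Dict.mem_items_insert_self _ _ _, by omega⟩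
    · simp only [hv, if_false]
      exact ⟨w0, hm, le_refl w0⟩
  · cases hg : d.get? k with
    | none => exact ⟨w0, (PySem.Dict.mem_items_insert _ _ _ _).mpr (Or.inr ⟨hm, hk⟩), le_refl w0⟩
    | some v0 =>
      by_cases hv : v > v0
      · simp only [hv, if_true]
        exact ⟨w0, (PySem.Dict.mem_items_insert _ _ _ _).mpr (Or.inr ⟨hm, hk⟩), le_refl w0⟩
      · simp only [hv, if_false]
        exact ⟨w0, hm, le_refl w0⟩

-- folding insert-max over an entry list
theorem pvIMfold_nodup (E : List ((Int × Int) × Int)) : ∀ (d : PySem.Dict (Int × Int) Int),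
    d.keys.Nodup → (E.foldl (fun d q => pvInsMax d q.1 q.2) d).keys.Nodup := by
  induction E with
  | nil => intro d h; exact h
  | cons q E ih => intro d h; exact ih _ (pvInsMax_nodup d q.1 q.2 h)

theorem pvIMfold_mem (E : List ((Int × Int) × Int)) : ∀ (d : PySem.Dict (Int × Int) Int)
    (p : (Int × Int) × Int), p ∈ (E.foldl (fun d q => pvInsMax d q.1 q.2) d).items →
    p ∈ d.items ∨ p ∈ E := by
  induction E with
  | nil => intro d p h; exact Or.inl h
  | cons q E ih =>
    intro d p h
    rcases ih _ p h with h1 | h1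
    · rcases pvInsMax_mem d q.1 q.2 p h1 with h2 | h2
      · exact Or.inl h2
      · exact Or.inr (by rw [h2]; exact List.mem_cons_self)
    · exact Or.inr (List.mem_cons_of_mem q h1)

theorem pvIMfold_pres (E : List ((Int × Int) × Int)) : ∀ (d : PySem.Dict (Int × Int) Int)
    (k0 : Int × Int) (w0 : Int), d.keys.Nodup → (k0, w0) ∈ d.items →
    ∃ w, (k0, w) ∈ (E.foldl (fun d q => pvInsMax d q.1 q.2) d).items ∧ w0 ≤ w := by
  induction E with
  | nil => intro d k0 w0 h hm; exact ⟨w0, hm, le_refl w0⟩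
  | cons q E ih =>
    intro d k0 w0 h hm
    rcases pvInsMax_pres d q.1 q.2 k0 w0 h hm with ⟨w1, hw1, hle1⟩
    rcases ih _ k0 w1 (pvInsMax_nodup d q.1 q.2 h) hw1 with ⟨w, hw, hle⟩
    exact ⟨w, hw, by omega⟩

theorem pvIMfold_all (E : List ((Int × Int) × Int)) : ∀ (d : PySem.Dict (Int × Int) Int)
    (q : (Int × Int) × Int), d.keys.Nodup → q ∈ E →
    ∃ w, (q.1, w) ∈ (E.foldl (fun d q => pvInsMax d q.1 q.2) d).items ∧ q.2 ≤ w := by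
  induction E with
  | nil => intro d q h hq; cases hq
  | cons q' E ih =>
    intro d q h hq
    rcases List.mem_cons.mp hq with rfl | hq'
    · rcases pvInsMax_self d q.1 q.2 h with ⟨w1, hw1, hle1⟩
      rcases pvIMfold_pres E _ q.1 w1 (pvInsMax_nodup d q.1 q.2 h) hw1 with ⟨w, hw, hle⟩
      exact ⟨w, hw, by omega⟩
    · exact ih _ q (pvInsMax_nodup d q'.1 q'.2 h) hq'

-- nested fold = fold over the flattened entry list
theorem pvFoldl_flatten {α β : Type} (l : List α) (g : α → List β)
    (f : PySem.Dict (Int × Int) Int → β → PySem.Dict (Int × Int) Int) :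
    ∀ (init : PySem.Dict (Int × Int) Int),
    l.foldl (fun acc x => (g x).foldl f acc) init = (l.flatMap g).foldl f init := by
  induction l with
  | nil => intro init; rfl
  | cons x l ih =>
    intro init
    rw [List.foldl_cons, List.flatMap_cons, List.foldl_append]
    exact ih _

-- the entry list a single pvStep pushes through pvInsMax
def pvStepE (t1 t2 : List Int) (S : PySem.Dict (Int × Int) Int) (i : Int) : List ((Int × Int) × Int) :=
  S.items.flatMap (fun s => (pvMoves (PySem.List.pyGetD t1 i 0) (PySem.List.pyGetD t2 i 0)).map
    (fun mv => ((s.1.1 + mv.1, s.1.2 + mv.2.1), s.2 + mv.2.2)))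

theorem pvStep_eq (t1 t2 : List Int) (S : PySem.Dict (Int × Int) Int) (i : Int) :
    pvStep t1 t2 S i = (pvStepE t1 t2 S i).foldl (fun d q => pvInsMax d q.1 q.2) PySem.Dict.empty := by
  unfold pvStep pvStepE
  rw [← pvFoldl_flatten]
  congr 1


theorem pvEmpty_items : (PySem.Dict.empty : PySem.Dict (Int × Int) Int).items = [] := by
  have h := PySem.Dict.keys_empty (κ := Int × Int) (ν := Int)
  unfold PySem.Dict.keys at h
  exact List.map_eq_nil_iff.mp h

theorem pvEmpty_nodup : (PySem.Dict.empty : PySem.Dict (Int × Int) Int).keys.Nodup := by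
  rw [PySem.Dict.keys_empty]; exact List.nodup_nil

theorem pvStep_nodup (t1 t2 : List Int) (S : PySem.Dict (Int × Int) Int) (i : Int) :
    (pvStep t1 t2 S i).keys.Nodup := by
  rw [pvStep_eq]; exact pvIMfold_nodup _ _ pvEmpty_nodup

theorem pvStep_sound (t1 t2 : List Int) (S : PySem.Dict (Int × Int) Int) (i : Int)
    (p : (Int × Int) × Int) (h : p ∈ (pvStep t1 t2 S i).items) :
    ∃ s ∈ S.items, ∃ mv ∈ pvMoves (PySem.List.pyGetD t1 i 0) (PySem.List.pyGetD t2 i 0),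
      p = ((s.1.1 + mv.1, s.1.2 + mv.2.1), s.2 + mv.2.2) := by
  rw [pvStep_eq] at h
  rcases pvIMfold_mem _ _ p h with h1 | h1
  · rw [pvEmpty_items] at h1; cases h1
  · unfold pvStepE at h1
    rcases List.mem_flatMap.mp h1 with ⟨s, hs, hp⟩
    rcases List.mem_map.mp hp with ⟨mv, hmv, rfl⟩
    exact ⟨s, hs, mv, hmv, rfl⟩

theorem pvStep_complete (t1 t2 : List Int) (S : PySem.Dict (Int × Int) Int) (i : Int)
    (s : (Int × Int) × Int) (hs : s ∈ S.items)
    (mv : Int × Int × Int) (hmv : mv ∈ pvMoves (PySem.List.pyGetD t1 i 0) (PySem.List.pyGetD t2 i 0)) :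
    ∃ w, ((s.1.1 + mv.1, s.1.2 + mv.2.1), w) ∈ (pvStep t1 t2 S i).items ∧ s.2 + mv.2.2 ≤ w := by
  rw [pvStep_eq]
  have hq : ((s.1.1 + mv.1, s.1.2 + mv.2.1), s.2 + mv.2.2) ∈ pvStepE t1 t2 S i := by
    unfold pvStepE
    exact List.mem_flatMap.mpr ⟨s, hs, List.mem_map.mpr ⟨mv, hmv, rfl⟩⟩
  exact pvIMfold_all _ _ _ pvEmpty_nodup hq

theorem pvEnumFold_nodup (t1 t2 : List Int) (l : List Int) : ∀ (S : PySem.Dict (Int × Int) Int),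
    S.keys.Nodup → (l.foldl (pvStep t1 t2) S).keys.Nodup := by
  induction l with
  | nil => intro S h; exact h
  | cons i l ih => intro S h; exact ih _ (pvStep_nodup t1 t2 S i)

theorem pvEnumFold_sound (t1 t2 : List Int) (l : List Int) :
    ∀ (S : PySem.Dict (Int × Int) Int),
    ∀ p ∈ (l.foldl (pvStep t1 t2) S).items,
      ∃ s ∈ S.items, ∃ q ∈ pvPaths (pvPairs t1 t2 l),
        p.1.1 = s.1.1 + q.1 ∧ p.1.2 = s.1.2 + q.2.1 ∧ p.2 = s.2 + q.2.2 := by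
  induction l with
  | nil =>
    intro S p hp
    exact ⟨p, hp, (0, 0, 0), by simp [pvPaths, pvPairs], by simp⟩
  | cons i l ih =>
    intro S p hp
    rcases ih (pvStep t1 t2 S i) p hp with ⟨s', hs', q', hq', h1, h2, h3⟩
    rcases pvStep_sound t1 t2 S i s' hs' with ⟨s, hs, mv, hmv, rfl⟩
    refine ⟨s, hs, pvAdd3 mv q', ?_, ?_, ?_, ?_⟩
    · rw [pvPairs_cons]
      exact (mem_pvPaths_cons _ _ _).mpr ⟨mv, by simpa using hmv, q', hq', rfl⟩
    · simp only [pvAdd3] at *; omega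
    · simp only [pvAdd3] at *; omega
    · simp only [pvAdd3] at *; omega

theorem pvEnumFold_complete (t1 t2 : List Int) (l : List Int) :
    ∀ (S : PySem.Dict (Int × Int) Int), S.keys.Nodup →
    ∀ s ∈ S.items, ∀ q ∈ pvPaths (pvPairs t1 t2 l),
      ∃ w, ((s.1.1 + q.1, s.1.2 + q.2.1), w) ∈ (l.foldl (pvStep t1 t2) S).items ∧ s.2 + q.2.2 ≤ w := by
  induction l with
  | nil =>
    intro S _ s hs q hq
    simp only [pvPairs, List.map_nil, pvPaths, List.mem_singleton] at hq
    subst hq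
    exact ⟨s.2, by simpa using hs, by simp⟩
  | cons i l ih =>
    intro S hS s hs q hq
    rw [pvPairs_cons] at hq
    rcases (mem_pvPaths_cons _ _ _).mp hq with ⟨mv, hmv, q', hq', rfl⟩
    rcases pvStep_complete t1 t2 S i s hs mv (by simpa using hmv) with ⟨w1, hw1, hle1⟩
    rcases ih (pvStep t1 t2 S i) (pvStep_nodup t1 t2 S i) _ hw1 q' hq' with ⟨w, hw, hle⟩
    refine ⟨w, ?_, ?_⟩
    · have h1 : s.1.1 + (pvAdd3 mv q').1 = s.1.1 + mv.1 + q'.1 := by simp only [pvAdd3]; ring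
      have h2 : s.1.2 + (pvAdd3 mv q').2.1 = s.1.2 + mv.2.1 + q'.2.1 := by simp only [pvAdd3]; ring
      rw [List.foldl_cons, h1, h2]
      exact hw
    · simp only [pvAdd3] at *; omega

theorem pvInit_items : (PySem.Dict.ofList [(((0 : Int), (0 : Int)), (0 : Int))]).items = [((0, 0), 0)] := by decide

theorem pvInit_nodup : (PySem.Dict.ofList [(((0 : Int), (0 : Int)), (0 : Int))]).keys.Nodup := by decide

theorem pvEnum_sound (t1 t2 : List Int) (l : List Int) (p : (Int × Int) × Int)
    (h : p ∈ (pvEnum t1 t2 l).items) :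
    ∃ q ∈ pvPaths (pvPairs t1 t2 l), p.1.1 = q.1 ∧ p.1.2 = q.2.1 ∧ p.2 = q.2.2 := by
  unfold pvEnum at h
  rcases pvEnumFold_sound t1 t2 l _ p h with ⟨s, hs, q, hq, h1, h2, h3⟩
  rw [pvInit_items] at hs
  simp only [List.mem_singleton] at hs
  subst hs
  exact ⟨q, hq, by simpa using h1, by simpa using h2, by simpa using h3⟩

theorem pvEnum_complete (t1 t2 : List Int) (l : List Int) (q : Int × Int × Int)
    (hq : q ∈ pvPaths (pvPairs t1 t2 l)) :
    ∃ w, ((q.1, q.2.1), w) ∈ (pvEnum t1 t2 l).items ∧ q.2.2 ≤ w := by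
  unfold pvEnum
  have := pvEnumFold_complete t1 t2 l _ pvInit_nodup ((0, 0), 0) (by rw [pvInit_items]; exact List.mem_singleton.mpr rfl) q hq
  simpa using this

theorem pvEnum_nodup (t1 t2 : List Int) (l : List Int) : (pvEnum t1 t2 l).keys.Nodup := by
  unfold pvEnum
  exact pvEnumFold_nodup t1 t2 l _ pvInit_nodup

-- join-loop toolbox (the final for-loop of B)
def pvJoinStep (right : PySem.Dict (Int × Int) Int) (s1 s2 m1 m2 : Int)
    (best : Option Int) (s : (Int × Int) × Int) : Option Int :=
  match right.get? (s2 - s1 - s.1.1, m2 - m1 - s.1.2) with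
  | none => best
  | some r =>
      let v := m1 + s.2 + r
      match best with
      | none => some v
      | some bv => if v > bv then some v else some bv

theorem pvJoin_le (R : PySem.Dict (Int × Int) Int) (s1 s2 m1 m2 : Int) (L : List ((Int × Int) × Int)) :
    ∀ (acc : Option Int) (b0 : Int), acc = some b0 →
      ∃ b, L.foldl (pvJoinStep R s1 s2 m1 m2) acc = some b ∧ b0 ≤ b := by
  induction L with
  | nil => intro acc b0 h; exact ⟨b0, h, le_refl b0⟩
  | cons s' L ih =>
    intro acc b0 h
    subst h
    rw [List.foldl_cons]
    unfold pvJoinStep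
    cases hg : R.get? (s2 - s1 - s'.1.1, m2 - m1 - s'.1.2) with
    | none => exact ih _ b0 rfl
    | some r =>
      by_cases hv : m1 + s'.2 + r > b0
      · simp only [hv, if_true]
        rcases ih _ (m1 + s'.2 + r) rfl with ⟨b, hb, hle⟩
        exact ⟨b, hb, by omega⟩
      · simp only [hv, if_false]
        exact ih _ b0 rfl

theorem pvJoin_ge (R : PySem.Dict (Int × Int) Int) (s1 s2 m1 m2 : Int) (L : List ((Int × Int) × Int)) :
    ∀ (acc : Option Int) (s : (Int × Int) × Int) (r : Int), s ∈ L →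
      R.get? (s2 - s1 - s.1.1, m2 - m1 - s.1.2) = some r →
      ∃ b, L.foldl (pvJoinStep R s1 s2 m1 m2) acc = some b ∧ m1 + s.2 + r ≤ b := by
  induction L with
  | nil => intro acc s r h; cases h
  | cons s' L ih =>
    intro acc s r hmem hg
    rcases List.mem_cons.mp hmem with rfl | hmem'
    · rw [List.foldl_cons]
      unfold pvJoinStep
      rw [hg]
      cases acc with
      | none =>
        rcases pvJoin_le R s1 s2 m1 m2 L _ (m1 + s.2 + r) rfl with ⟨b, hb, hle⟩
        exact ⟨b, hb, hle⟩
      | some bv =>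
        by_cases hv : m1 + s.2 + r > bv
        · simp only [hv, if_true]
          rcases pvJoin_le R s1 s2 m1 m2 L _ (m1 + s.2 + r) rfl with ⟨b, hb, hle⟩
          exact ⟨b, hb, hle⟩
        · simp only [hv, if_false]
          rcases pvJoin_le R s1 s2 m1 m2 L _ bv rfl with ⟨b, hb, hle⟩
          exact ⟨b, hb, by omega⟩
    · exact ih _ s r hmem' hg

theorem pvJoin_cases (R : PySem.Dict (Int × Int) Int) (s1 s2 m1 m2 : Int) (L0 : List ((Int × Int) × Int)) :
    ∀ (L : List ((Int × Int) × Int)), (∀ s ∈ L, s ∈ L0) → ∀ (acc : Option Int),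
      (acc = none ∨ ∃ s ∈ L0, ∃ r, R.get? (s2 - s1 - s.1.1, m2 - m1 - s.1.2) = some r ∧ acc = some (m1 + s.2 + r)) →
      (L.foldl (pvJoinStep R s1 s2 m1 m2) acc = none ∨
        ∃ s ∈ L0, ∃ r, R.get? (s2 - s1 - s.1.1, m2 - m1 - s.1.2) = some r ∧
          L.foldl (pvJoinStep R s1 s2 m1 m2) acc = some (m1 + s.2 + r)) := by
  intro L
  induction L with
  | nil => intro _ acc h; exact h
  | cons s' L ih =>
    intro hsub acc h
    rw [List.foldl_cons]
    apply ih (fun s hs => hsub s (List.mem_cons_of_mem s' hs))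
    unfold pvJoinStep
    cases hg : R.get? (s2 - s1 - s'.1.1, m2 - m1 - s'.1.2) with
    | none => exact h
    | some r =>
      cases acc with
      | none => exact Or.inr ⟨s', hsub s' List.mem_cons_self, r, hg, rfl⟩
      | some bv =>
        rcases h with h | ⟨s0, hs0, r0, hg0, h0⟩
        · cases h
        · by_cases hv : m1 + s'.2 + r > bv
          · simp only [hv, if_true]
            exact Or.inr ⟨s', hsub s' List.mem_cons_self, r, hg, rfl⟩
          · simp only [hv, if_false]
            exact Or.inr ⟨s0, hs0, r0, hg0, h0⟩

-- B rewritten through pvJoinStep (definitional)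
theorem rekur_alt_eq (t1 t2 : List Int) (id s1 s2 m1 m2 : Int) :
    rekur_alt t1 t2 id s1 s2 m1 m2 =
      (let idx := PySem.List.pyRange id (t1.length : Int) 1
       let h := PySem.Int.floordiv (idx.length : Int) 2
       let best := ((pvEnum t1 t2 (PySem.List.slice idx none (some h))).items.foldl
         (pvJoinStep (pvEnum t1 t2 (PySem.List.slice idx (some h) none)) s1 s2 m1 m2) none)
       if idx = [] then (match best with | some b => b | none => 0)
       else (match best with | none => 0 | some b => max b 0)) := rfl

theorem pvEnum_nil (t1 t2 : List Int) : pvEnum t1 t2 [] = PySem.Dict.ofList [((0, 0), 0)] := rfl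

theorem pvInit_eq_mk : PySem.Dict.ofList [(((0 : Int), (0 : Int)), (0 : Int))] = PySem.Dict.mk [((0, 0), 0)] := by decide

theorem pvSlice_nil (a b : Option Int) : PySem.List.slice ([] : List Int) a b = [] := by
  cases a <;> cases b <;> simp [PySem.List.slice]

-- the empty-range case of B
theorem rekur_alt_of_nil (t1 t2 : List Int) (id s1 s2 m1 m2 : Int)
    (hnil : PySem.List.pyRange id (t1.length : Int) 1 = []) :
    rekur_alt t1 t2 id s1 s2 m1 m2 = if s1 = s2 ∧ m1 = m2 then m1 else 0 := by
  rw [rekur_alt_eq]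
  simp only [hnil, pvSlice_nil, pvEnum_nil, pvInit_items, List.foldl_cons, List.foldl_nil]
  unfold pvJoinStep
  rw [pvInit_eq_mk, PySem.Dict.get?_mk_cons]
  by_cases hc : s1 = s2 ∧ m1 = m2
  · have hbeq : (((0, 0) : Int × Int) == (s2 - s1 - ((0, 0), (0 : Int)).1.1, m2 - m1 - ((0, 0), (0 : Int)).1.2)) = true := by
      rw [beq_iff_eq]
      refine Prod.ext ?_ ?_ <;> simp <;> omega
    rw [hbeq]
    simp only [if_pos hc]
    simp
  · have hbeq : (((0, 0) : Int × Int) == (s2 - s1 - ((0, 0), (0 : Int)).1.1, m2 - m1 - ((0, 0), (0 : Int)).1.2)) = false := by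
      rw [beq_eq_false_iff_ne]
      intro h
      have h1 := congrArg Prod.fst h
      have h2 := congrArg Prod.snd h
      simp at h1 h2
      exact hc ⟨by omega, by omega⟩
    rw [hbeq]
    simp only [if_neg hc]
    rfl

-- ===== VERDICT (by name: the statement is the Claim_ definition above) =====
theorem rekur_spec : Claim_equal_rekur := by
  intro t1 t2 id s1 s2 m1 m2 hdom hpre
  unfold Spec_rekur
  obtain ⟨hp1, hp2, hp3, hp4⟩ := hpre
  by_cases hid : id = (t1.length : Int)
  · -- empty remaining range
    have hnil : PySem.List.pyRange id (t1.length : Int) 1 = [] := by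
      rw [hid]; exact PySem.List.pyRange_one_eq_nil (le_refl _)
    rw [rekur, dif_pos hid, rekur_alt_of_nil t1 t2 id s1 s2 m1 m2 hnil]
  · -- nonempty remaining range
    have hlt : id < (t1.length : Int) := by omega
    have hacc : ∀ i : Int, id ≤ i → i < (t1.length : Int) →
        PySem.Raise.InRange t1.length i ∧ PySem.Raise.InRange t2.length i := by
      intro i h1 h2
      unfold PySem.Raise.InRange
      have hn12 : (t1.length : Int) ≤ (t2.length : Int) := hp3 hlt
      by_cases hi0 : 0 ≤ i
      · exact ⟨⟨by omega, h2⟩, ⟨by omega, by omega⟩⟩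
      · have := hp4 (by omega)
        exact ⟨⟨by omega, h2⟩, ⟨by omega, by omega⟩⟩
    have hchar := rekur_char t1 t2 ((t1.length : Int) - id).toNat id s1 s2 m1 m2 rfl hp2 hacc
    rw [hchar, rekur_alt_eq]
    -- name the pieces of B
    set idx := PySem.List.pyRange id (t1.length : Int) 1 with hidx
    have hne : idx ≠ [] := by
      rw [hidx, PySem.List.pyRange_one_cons hlt]
      exact List.cons_ne_nil _ _
    set hh := PySem.Int.floordiv (idx.length : Int) 2 with hhh
    have hh0 : 0 ≤ hh := by
      rw [hhh, PySem.Int.floordiv_eq_ediv_of_pos (by omega)]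
      exact Int.ediv_nonneg (by omega) (by omega)
    set l1 := PySem.List.slice idx none (some hh) with hl1
    set l2 := PySem.List.slice idx (some hh) none with hl2
    have hsplit : l1 ++ l2 = idx := by
      rw [hl1, hl2, PySem.List.slice_to _ hh0, PySem.List.slice_from _ hh0]
      exact List.take_append_drop _ _
    have hpairs : pvPairs t1 t2 l1 ++ pvPairs t1 t2 l2 = pvPairs t1 t2 idx := by
      rw [← hsplit]; simp [pvPairs]
    set L := pvEnum t1 t2 l1 with hL
    set R := pvEnum t1 t2 l2 with hR
    set d0 := s1 - s2 with hd0
    set c0 := m1 - m2 with hc0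
    simp only [if_neg hne]
    -- candidates are bounded by A's maximum
    have hcand_le : ∀ (s : (Int × Int) × Int) (r : Int), s ∈ L.items →
        R.get? (s2 - s1 - s.1.1, m2 - m1 - s.1.2) = some r →
        m1 + s.2 + r ≤ pvMaxOf ((pvPaths (pvPairs t1 t2 idx)).map (pvVal d0 c0 m1)) := by
      intro s r hs hget
      rcases pvEnum_sound t1 t2 l1 s hs with ⟨p, hp, e1, e2, e3⟩
      rcases pvEnum_sound t1 t2 l2 _ (PySem.Dict.mem_items_of_get?_eq_some _ hget) with ⟨q, hq, f1, f2, f3⟩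
      have hmem : pvAdd3 p q ∈ pvPaths (pvPairs t1 t2 idx) := by
        rw [← hpairs]
        exact (mem_pvPaths_append _ _ _).mpr ⟨p, hp, q, hq, rfl⟩
      have hval : pvVal d0 c0 m1 (pvAdd3 p q) = m1 + s.2 + r := by
        simp only [pvVal, pvAdd3] at *
        rw [if_pos (by omega)]
        omega
      rw [← hval]
      exact le_pvMaxOf _ _ (List.mem_map_of_mem hmem)
    -- A's maximum is at least 0
    have h0le : 0 ≤ pvMaxOf ((pvPaths (pvPairs t1 t2 idx)).map (pvVal d0 c0 m1)) := by
      rcases pvPaths_zero_val (pvPairs t1 t2 idx) d0 c0 m1 (by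
        intro h
        have hidxnil : idx = [] := by simpa [pvPairs] using congrArg List.length h
        exact hne hidxnil) with ⟨p, hp, hv⟩
      rw [← hv]
      exact le_pvMaxOf _ _ (List.mem_map_of_mem hp)
    -- every value of A's list is at most the join result (when it is a match)
    have hjoin := pvJoin_cases R s1 s2 m1 m2 L.items L.items (fun s hs => hs) none (Or.inl rfl)
    rcases hjoin with hnone | ⟨s, hs, r, hget, hsome⟩
    · -- no candidate: B returns 0 and A's maximum is 0
      rw [hnone]
      show pvMaxOf ((pvPaths (pvPairs t1 t2 idx)).map (pvVal d0 c0 m1)) = 0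
      have hA_le : pvMaxOf ((pvPaths (pvPairs t1 t2 idx)).map (pvVal d0 c0 m1)) ≤ 0 := by
        apply pvMaxOf_le _ _ (by
          intro h
          have := List.map_eq_nil_iff.mp h
          exact pvPaths_ne_nil _ this)
        intro y hy
        rcases List.mem_map.mp hy with ⟨p, hp, rfl⟩
        rw [← hpairs] at hp
        rcases (mem_pvPaths_append _ _ _).mp hp with ⟨pa, hpa, pb, hpb, rfl⟩
        by_cases hcond : d0 + (pvAdd3 pa pb).1 = 0 ∧ c0 + (pvAdd3 pa pb).2.1 = 0
        · exfalso
          rcases pvEnum_complete t1 t2 l1 pa hpa with ⟨v, hv, hvle⟩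
          rcases pvEnum_complete t1 t2 l2 pb hpb with ⟨w, hw, hwle⟩
          have hkey : ((s2 - s1 - ((pa.1, pa.2.1) : Int × Int).1, m2 - m1 - ((pa.1, pa.2.1) : Int × Int).2) : Int × Int) = (pb.1, pb.2.1) := by
            simp only [pvAdd3] at hcond
            refine Prod.ext ?_ ?_ <;> simp <;> omega
          have hget' : R.get? (s2 - s1 - ((pa.1, pa.2.1), v).1.1, m2 - m1 - ((pa.1, pa.2.1), v).1.2) = some w := by
            simp only
            rw [hkey]
            exact PySem.Dict.get?_of_mem_items _ hw (pvEnum_nodup t1 t2 l2)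
          rcases pvJoin_ge R s1 s2 m1 m2 L.items none ((pa.1, pa.2.1), v) w hv hget' with ⟨b, hb, -⟩
          rw [hnone] at hb
          cases hb
        · simp [pvVal, if_neg hcond]
      exact le_antisymm hA_le h0le
    · -- some candidate b: B returns max b 0
      rw [hsome]
      show pvMaxOf ((pvPaths (pvPairs t1 t2 idx)).map (pvVal d0 c0 m1)) = max (m1 + s.2 + r) 0
      have hble := hcand_le s r hs hget
      apply le_antisymm
      · -- A ≤ max b 0
        apply pvMaxOf_le _ _ (by
          intro h
          have := List.map_eq_nil_iff.mp h
          exact pvPaths_ne_nil _ this)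
        intro y hy
        rcases List.mem_map.mp hy with ⟨p, hp, rfl⟩
        rw [← hpairs] at hp
        rcases (mem_pvPaths_append _ _ _).mp hp with ⟨pa, hpa, pb, hpb, rfl⟩
        by_cases hcond : d0 + (pvAdd3 pa pb).1 = 0 ∧ c0 + (pvAdd3 pa pb).2.1 = 0
        · rcases pvEnum_complete t1 t2 l1 pa hpa with ⟨v, hv, hvle⟩
          rcases pvEnum_complete t1 t2 l2 pb hpb with ⟨w, hw, hwle⟩
          have hkey : ((s2 - s1 - ((pa.1, pa.2.1) : Int × Int).1, m2 - m1 - ((pa.1, pa.2.1) : Int × Int).2) : Int × Int) = (pb.1, pb.2.1) := by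
            simp only [pvAdd3] at hcond
            refine Prod.ext ?_ ?_ <;> simp <;> omega
          have hget' : R.get? (s2 - s1 - ((pa.1, pa.2.1), v).1.1, m2 - m1 - ((pa.1, pa.2.1), v).1.2) = some w := by
            simp only
            rw [hkey]
            exact PySem.Dict.get?_of_mem_items _ hw (pvEnum_nodup t1 t2 l2)
          rcases pvJoin_ge R s1 s2 m1 m2 L.items none ((pa.1, pa.2.1), v) w hv hget' with ⟨b', hb', hble'⟩
          rw [hsome] at hb'
          injection hb' with hb'
          have : pvVal d0 c0 m1 (pvAdd3 pa pb) = m1 + pa.2.2 + pb.2.2 := by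
            simp only [pvVal, pvAdd3]
            simp only [pvAdd3] at hcond
            rw [if_pos (by omega : d0 + (pa.1 + pb.1) = 0 ∧ c0 + (pa.2.1 + pb.2.1) = 0)]
            ring
          rw [this]
          have : m1 + pa.2.2 + pb.2.2 ≤ m1 + v + w := by omega
          omega
        · simp only [pvVal, if_neg hcond]
          omega
      · -- max b 0 ≤ A
        exact max_le hble h0le
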